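-- pv_equiv track=rewrite | github.com/rzieber/Turkiye_Intercomparison | resources/functions.py | sort_columns
-- ===== SOURCE A (Python) =====
-- def sort_columns(columns:list) -> list:
--     if not isinstance(columns, list):
--         raise TypeError(f"The 'columns' parameter in sort_columns() should be of type <list>, passed: {type(columns)}")
--
--     sort = [
--         'bt1', 'bp1', 'bh1', 'ht1', 'hh1', 'mt1', 'rg', 'sv1', 'si1', 'su1', 'wd', 'ws'
--     ]
--
--     sorted_columns = [i for i in sort if i in columns] # list of strings
--
--     return sorted_columns
-- ===== SOURCE B (Python) =====
-- def sort_columns(columns: list) -> list: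
--     if not isinstance(columns, list):
--         raise TypeError(f"The 'columns' parameter in sort_columns() should be of type <list>, passed: {type(columns)}")
--
--     sort = [
--         'bt1', 'bp1', 'bh1', 'ht1', 'hh1', 'mt1', 'rg', 'sv1', 'si1', 'su1', 'wd', 'ws'
--     ]
--
--     # set intersection in one hashed pass (dedups, matching the comprehension's single emission),
--     # then restore the canonical order by sorting on canonical position
--     return sorted(set(columns) & set(sort), key=sort.index)
-- ===== Notes on version B (the rewrite author's own statement) =====
-- stated objective: faster
-- what changed: A walks the fixed canonical list and scans all of columns for each of the 12 names; B computes the set intersection set(columns) & set(sort) (one hashed pass over columns) and recovers the canonical order by sorting the at-most-12 survivors with key=sort.index.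
import Mathlib
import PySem

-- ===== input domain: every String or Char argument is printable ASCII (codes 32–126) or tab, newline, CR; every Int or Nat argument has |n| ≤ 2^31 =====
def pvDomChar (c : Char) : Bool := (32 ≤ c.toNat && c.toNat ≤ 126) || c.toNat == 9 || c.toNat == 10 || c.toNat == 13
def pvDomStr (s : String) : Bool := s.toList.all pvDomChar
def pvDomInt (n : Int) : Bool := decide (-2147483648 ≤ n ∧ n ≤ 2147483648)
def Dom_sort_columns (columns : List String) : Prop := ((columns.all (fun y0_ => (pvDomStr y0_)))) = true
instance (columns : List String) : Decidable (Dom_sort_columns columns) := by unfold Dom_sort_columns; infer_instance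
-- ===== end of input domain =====

-- B computes sorted(set(columns) & set(sort), key=sort.index) instead of A's membership walk
-- over the canonical list (objective: faster, measured; return value only — the isinstance TypeError
-- guard is untypable here and vacuous for a List String argument).

-- ===== PORT A =====
-- A: fixed canonical list, comprehension [i for i in sort if i in columns]
def sort_columns (columns : List String) : List String :=
  let sort : List String :=
    ["bt1", "bp1", "bh1", "ht1", "hh1", "mt1", "rg", "sv1", "si1", "su1", "wd", "ws"]
  sort.filter (fun i => columns.contains i)

-- ===== PORT B =====
def pvSORT : List String :=
  ["bt1", "bp1", "bh1", "ht1", "hh1", "mt1", "rg", "sv1", "si1", "su1", "wd", "ws"]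

-- key=sort.index: sort.index c is PySem.List.index?; it is only ever applied to members of
-- sort (elements of the intersection), where it is `some`, so `.getD 0` is exact there.
def pvKey (c : String) : Nat := (PySem.List.index? pvSORT c).getD 0

-- sorted(set(columns) & set(sort), key=sort.index); Python's set iteration order is
-- unspecified, but `sorted` with this duplicate-free injective-on-the-set key makes the
-- result order-independent, so sorting the PySem intersection is exact.
def sort_columns_alt (columns : List String) : List String :=
  PySem.List.sorted
    (PySem.Set.inter (PySem.Set.ofList columns) (PySem.Set.ofList pvSORT))
    pvKey false

-- ===== PRECONDITION & SPEC =====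
def Spec_sort_columns (columns : List String) (out : List String) : Prop := out = sort_columns_alt columns
instance (columns : List String) (out : List String) : Decidable (Spec_sort_columns columns out) := by unfold Spec_sort_columns; infer_instance

-- ===== CLAIM =====
def Claim_equal_sort_columns : Prop := ∀ (columns : List String), Dom_sort_columns columns → Spec_sort_columns columns (sort_columns columns)

-- ===== LEMMAS AND PROOFS =====

theorem pvSORT_pairwise : pvSORT.Pairwise (fun a b => pvKey a < pvKey b) := by decide

theorem mem_inter (cs : List String) (x : String) :
    x ∈ PySem.Set.inter (PySem.Set.ofList cs) (PySem.Set.ofList pvSORT)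
      ↔ x ∈ cs ∧ x ∈ pvSORT := by
  constructor
  · intro h
    have := (PySem.Set.mem_inter _ _ _).mp h
    exact ⟨(PySem.Set.mem_ofList _ _).mp this.1, by
      simpa using this.2⟩
  · intro ⟨h1, h2⟩
    exact (PySem.Set.mem_inter _ _ _).mpr ⟨(PySem.Set.mem_ofList _ _).mpr h1, by simpa using h2⟩

theorem nodup_inter (cs : List String) :
    (PySem.Set.inter (PySem.Set.ofList cs) (PySem.Set.ofList pvSORT)).Nodup := by
  exact PySem.Set.nodup_inter _ _ (PySem.Set.nodup_ofList cs)

-- ===== VERDICT =====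
theorem sort_columns_spec : Claim_equal_sort_columns := by
  intro cs _
  show sort_columns cs = sort_columns_alt cs
  unfold sort_columns sort_columns_alt
  refine (PySem.List.sorted_eq_of_perm_of_pairwise_lt _ _ pvKey ?_ ?_).symm
  · refine ((List.perm_ext_iff_of_nodup ?_ (nodup_inter cs)).mpr ?_)
    · exact (by decide : pvSORT.Nodup).filter _
    · intro x
      rw [mem_inter]
      simp [pvSORT, and_comm]
  · exact pvSORT_pairwise.filter _
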